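-- pv_equiv track=rewrite | github.com/guige2023/rabai_autoclick | utils/table_utils.py | grid_layout
-- ===== SOURCE A (Python) =====
-- import math
-- from typing import Any, Callable, Iterator, Sequence
--
-- def grid_layout(items: list[Any], num_cols: int, fill_last_row: bool = False) -> list[list[Any]]:
--     """
--     Arrange items in a grid.
--
--     Args:
--         items: Items to arrange
--         num_cols: Number of columns
--         fill_last_row: Pad last row with None if incomplete
--
--     Returns:
--         List of rows, each containing num_cols items
--     """
--     if num_cols <= 0:
--         raise ValueError("num_cols must be positive")
--
--     num_rows = math.ceil(len(items) / num_cols)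
--
--     if fill_last_row and len(items) % num_cols != 0:
--         padding = num_cols - (len(items) % num_cols)
--         items = list(items) + [None] * padding
--
--     return [items[i * num_cols : (i + 1) * num_cols] for i in range(num_rows)]
-- ===== SOURCE B (Python) =====
-- def grid_layout(items, num_cols, fill_last_row=False):
--     if num_cols <= 0:
--         raise ValueError("num_cols must be positive")
--     rows = []
--     current = []
--     for item in items:
--         current.append(item)
--         if len(current) == num_cols:
--             rows.append(current)
--             current = []
--     if current:
--         if fill_last_row:
--             current = current + [None] * (num_cols - len(current))
--         rows.append(current)
--     return rows
-- ===== Notes on version B (the rewrite author's own statement) =====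
-- stated objective: simpler
-- what changed: Replaces the ceil-arithmetic row count plus per-row slicing (and whole-list pre-padding) with a single accumulator pass that pushes items into the current row, flushing it whenever it reaches num_cols, padding only the final short row.
import Mathlib
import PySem

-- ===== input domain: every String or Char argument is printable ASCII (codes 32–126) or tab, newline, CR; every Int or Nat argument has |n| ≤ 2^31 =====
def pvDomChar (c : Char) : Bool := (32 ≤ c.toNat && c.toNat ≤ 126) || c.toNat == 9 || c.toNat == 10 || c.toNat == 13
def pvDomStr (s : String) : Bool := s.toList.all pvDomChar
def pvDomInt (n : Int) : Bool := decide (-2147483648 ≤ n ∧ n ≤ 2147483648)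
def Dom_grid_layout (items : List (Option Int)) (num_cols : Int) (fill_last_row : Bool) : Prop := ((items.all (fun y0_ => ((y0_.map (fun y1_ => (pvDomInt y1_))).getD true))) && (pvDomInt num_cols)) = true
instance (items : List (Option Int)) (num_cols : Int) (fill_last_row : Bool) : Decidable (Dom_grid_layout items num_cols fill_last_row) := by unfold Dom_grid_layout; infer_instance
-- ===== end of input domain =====

-- B replaces A's ceil-arithmetic row count + per-row slicing (and whole-list pre-padding) by a
-- single accumulator pass that flushes a row whenever it reaches num_cols (objective: simpler).

-- ===== PORT A =====
def grid_layout (items : List (Option Int)) (num_cols : Int) (fill_last_row : Bool) : List (List (Option Int)) :=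
  -- 'if num_cols <= 0: raise ValueError' → excluded by Pre_grid_layout
  let n : Int := items.length
  -- math.ceil(len(items) / num_cols): exact integer ceiling -((-n) // num_cols) (float division is exact at these sizes)
  let num_rows : Int := -(PySem.Int.floordiv (-n) num_cols)
  let items2 : List (Option Int) :=
    if fill_last_row = true ∧ PySem.Int.mod n num_cols ≠ 0 then
      items ++ List.replicate (num_cols - PySem.Int.mod n num_cols).toNat none
    else items
  (PySem.List.pyRange 0 num_rows 1).map
    (fun i => PySem.List.slice items2 (some (i * num_cols)) (some ((i + 1) * num_cols)))

-- ===== PORT B =====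
def altStep (num_cols : Int) (st : List (List (Option Int)) × List (Option Int)) (x : Option Int) :
    List (List (Option Int)) × List (Option Int) :=
  let cur := st.2 ++ [x]
  if (cur.length : Int) = num_cols then (st.1 ++ [cur], []) else (st.1, cur)

def grid_layout_alt (items : List (Option Int)) (num_cols : Int) (fill_last_row : Bool) : List (List (Option Int)) :=
  let st := items.foldl (altStep num_cols) ([], [])
  if st.2 = [] then st.1
  else st.1 ++ [if fill_last_row then st.2 ++ List.replicate (num_cols - (st.2.length : Int)).toNat none else st.2]

-- ===== PRECONDITION & SPEC =====
-- A raises ValueError exactly when num_cols ≤ 0; Pre_ excludes those inputs.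
def Pre_grid_layout (items : List (Option Int)) (num_cols : Int) (fill_last_row : Bool) : Prop := 0 < num_cols
instance (items : List (Option Int)) (num_cols : Int) (fill_last_row : Bool) : Decidable (Pre_grid_layout items num_cols fill_last_row) := by unfold Pre_grid_layout; infer_instance

def pvWitness_grid_layout : List (Option Int) × Int × Bool := ([some 1, none, some 2], 2, true)

def Spec_grid_layout (items : List (Option Int)) (num_cols : Int) (fill_last_row : Bool) (out : List (List (Option Int))) : Prop := out = grid_layout_alt items num_cols fill_last_row
instance (items : List (Option Int)) (num_cols : Int) (fill_last_row : Bool) (out : List (List (Option Int))) : Decidable (Spec_grid_layout items num_cols fill_last_row out) := by unfold Spec_grid_layout; infer_instance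

-- ===== CLAIM (what is proved, stated in full; the proofs are below) =====
def Claim_equal_grid_layout : Prop := ∀ (items : List (Option Int)) (num_cols : Int) (fill_last_row : Bool), Dom_grid_layout items num_cols fill_last_row → Pre_grid_layout items num_cols fill_last_row → Spec_grid_layout items num_cols fill_last_row (grid_layout items num_cols fill_last_row)

-- ===== LEMMAS AND PROOFS =====

/-- The full rows of the canonical chunking of `l` into rows of `j+1`. -/
def fullC (j : Nat) (l : List (Option Int)) : List (List (Option Int)) :=
  if _h : l.length < j + 1 then [] else l.take (j + 1) :: fullC j (l.drop (j + 1))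
  termination_by l.length
  decreasing_by simp; omega

/-- The trailing partial row (possibly `[]`). -/
def restC (j : Nat) (l : List (Option Int)) : List (Option Int) :=
  if l.length < j + 1 then l else restC j (l.drop (j + 1))
  termination_by l.length
  decreasing_by simp; omega

lemma fullC_small (j : Nat) (l : List (Option Int)) (h : l.length < j + 1) : fullC j l = [] := by
  rw [fullC]; simp [h]

lemma fullC_big (j : Nat) (l : List (Option Int)) (h : ¬ l.length < j + 1) :
    fullC j l = l.take (j + 1) :: fullC j (l.drop (j + 1)) := by
  rw [fullC]; simp [h]

lemma restC_small (j : Nat) (l : List (Option Int)) (h : l.length < j + 1) : restC j l = l := by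
  rw [restC]; simp [h]

lemma restC_big (j : Nat) (l : List (Option Int)) (h : ¬ l.length < j + 1) :
    restC j l = restC j (l.drop (j + 1)) := by
  rw [restC]; simp [h]

lemma restC_length (j : Nat) (l : List (Option Int)) : (restC j l).length = l.length % (j + 1) := by
  rw [restC]
  split
  · next h => rw [Nat.mod_eq_of_lt h]
  · next h =>
      rw [restC_length j (l.drop (j + 1))]
      simp only [List.length_drop]
      exact (Nat.mod_eq_sub_mod (by omega)).symm
  termination_by l.length
  decreasing_by simp; omega

/-- B's fold computes exactly the canonical chunking. -/
lemma foldl_altStep (j : Nat) (l : List (Option Int)) :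
    ∀ (cur : List (Option Int)) (rows : List (List (Option Int))), cur.length < j + 1 →
    l.foldl (altStep ((j + 1 : Nat) : Int)) (rows, cur) =
      (rows ++ fullC j (cur ++ l), restC j (cur ++ l)) := by
  induction l with
  | nil =>
      intro cur rows h
      simp [fullC_small j cur (by simpa using h), restC_small j cur (by simpa using h)]
  | cons x xs ih =>
      intro cur rows h
      simp only [List.foldl_cons]
      by_cases he : (cur ++ [x]).length = j + 1
      · have hstep : altStep ((j + 1 : Nat) : Int) (rows, cur) x = (rows ++ [cur ++ [x]], []) := by
          simp only [altStep]
          rw [if_pos (by exact_mod_cast he)]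
        rw [hstep, ih [] (rows ++ [cur ++ [x]]) (by simp)]
        have hsplit : cur ++ x :: xs = (cur ++ [x]) ++ xs := by simp
        have hfc : fullC j (cur ++ x :: xs) = (cur ++ [x]) :: fullC j xs := by
          rw [hsplit, fullC_big j ((cur ++ [x]) ++ xs) (by simp at he ⊢; omega),
            List.take_left' he, List.drop_left' he]
        have hrc : restC j (cur ++ x :: xs) = restC j xs := by
          rw [hsplit, restC_big j ((cur ++ [x]) ++ xs) (by simp at he ⊢; omega),
            List.drop_left' he]
        rw [hfc, hrc]
        simp
      · have hstep : altStep ((j + 1 : Nat) : Int) (rows, cur) x = (rows, cur ++ [x]) := by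
          simp only [altStep]
          rw [if_neg (by exact_mod_cast he)]
        rw [hstep, ih (cur ++ [x]) rows (by simp at he ⊢; omega)]
        simp

/-- A's slice comprehension computes the canonical chunking, for the right row count. -/
lemma map_chunks (j : Nat) : ∀ (r : Nat) (l : List (Option Int)),
    l.length ≤ r * (j + 1) → r * (j + 1) < l.length + (j + 1) →
    (List.range r).map (fun k => (l.drop (k * (j + 1))).take (j + 1)) =
      fullC j l ++ (if restC j l = [] then [] else [restC j l]) := by
  intro r
  induction r with
  | zero =>
      intro l h1 _
      have : l = [] := by
        cases l with
        | nil => rfl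
        | cons a as => simp at h1
      subst this
      simp [fullC_small j [] (by simp), restC_small j [] (by omega)]
  | succ r ih =>
      intro l h1 h2
      have e : (r + 1) * (j + 1) = r * (j + 1) + (j + 1) := by ring
      have hlow : r * (j + 1) < l.length := by omega
      rw [List.range_succ_eq_map, List.map_cons, List.map_map]
      have hmap : ∀ k, ((fun k => (l.drop (k * (j + 1))).take (j + 1)) ∘ Nat.succ) k =
          (fun k => ((l.drop (j + 1)).drop (k * (j + 1))).take (j + 1)) k := by
        intro k
        simp only [Function.comp, List.drop_drop, Nat.succ_eq_add_one]
        congr 2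
        ring
      rw [List.map_congr_left (fun k _ => hmap k)]
      by_cases hs : l.length < j + 1
      · have hr0 : r = 0 := by
          by_contra hr
          have : j + 1 ≤ r * (j + 1) := Nat.le_mul_of_pos_left _ (by omega)
          omega
        subst hr0
        have hln : l ≠ [] := by
          intro hnil; subst hnil; simp at hlow
        simp only [List.range_zero, List.map_nil, Nat.zero_mul, List.drop_zero]
        rw [List.take_of_length_le (by omega), fullC_small j l hs, restC_small j l hs]
        simp [hln]
      · rw [fullC_big j l hs, restC_big j l hs]
        rw [ih (l.drop (j + 1)) (by simp; omega) (by simp; omega)]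
        simp

/-- Padding the input so its length becomes a multiple of j+1 pads the last partial row. -/
lemma fullC_pad (j p : Nat) (l : List (Option Int)) (hne : restC j l ≠ [])
    (hp : (restC j l).length + p = j + 1) :
    fullC j (l ++ List.replicate p none) = fullC j l ++ [restC j l ++ List.replicate p none] := by
  by_cases h : l.length < j + 1
  · rw [restC_small j l h] at hne hp ⊢
    rw [fullC_small j l h]
    have hlen : (l ++ List.replicate p (none : Option Int)).length = j + 1 := by simp; omega
    rw [fullC_big j (l ++ List.replicate p none) (by omega)]
    rw [List.take_of_length_le (l := l ++ List.replicate p none) (by omega),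
      List.drop_eq_nil_of_le (as := l ++ List.replicate p none) (by omega),
      fullC_small j [] (by simp)]
    simp
  · rw [restC_big j l h] at hne hp ⊢
    rw [fullC_big j l h]
    have h1 : (l ++ List.replicate p (none : Option Int)).length = l.length + p := by simp
    rw [fullC_big j (l ++ List.replicate p none) (by omega)]
    rw [List.take_append_of_le_length (by omega), List.drop_append_of_le_length (by omega)]
    rw [fullC_pad j p (l.drop (j + 1)) hne hp]
    simp
  termination_by l.length
  decreasing_by simp; omega

/-- The ceiling-of-division A computes, characterised by a Nat bracket. -/
lemma ceil_eq (j r n : Nat) (h1 : n ≤ r * (j + 1)) (h2 : r * (j + 1) < n + (j + 1)) :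
    -(PySem.Int.floordiv (-(n : Int)) ((j + 1 : Nat) : Int)) = (r : Int) := by
  rw [PySem.Int.neg_floordiv_neg_eq_iff_of_pos (by exact_mod_cast Nat.succ_pos j)]
  constructor
  · have : ((r : Int) - 1) * ((j + 1 : Nat) : Int) = (r * (j + 1) : Nat) - ((j + 1 : Nat) : Int) := by
      push_cast; ring
    rw [this]
    omega
  · have : (r : Int) * ((j + 1 : Nat) : Int) = ((r * (j + 1) : Nat) : Int) := by push_cast; ring
    rw [this]
    exact_mod_cast h1

/-- One comprehension entry `items[i*num_cols : (i+1)*num_cols]` as a drop/take. -/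
lemma slice_row (j k : Nat) (l : List (Option Int)) :
    PySem.List.slice l (some ((k : Int) * ((j + 1 : Nat) : Int)))
      (some (((k : Int) + 1) * ((j + 1 : Nat) : Int))) = (l.drop (k * (j + 1))).take (j + 1) := by
  have e1 : (k : Int) * ((j + 1 : Nat) : Int) = ((k * (j + 1) : Nat) : Int) := by push_cast; ring
  have e2 : ((k : Int) + 1) * ((j + 1 : Nat) : Int) = (((k + 1) * (j + 1) : Nat) : Int) := by
    push_cast; ring
  rw [e1, e2, PySem.List.slice_natCast]
  congr 1
  have e3 : (k + 1) * (j + 1) = k * (j + 1) + (j + 1) := by ring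
  omega

/-- A's slice comprehension, in terms of the canonical chunking. -/
lemma A_side (j r : Nat) (l : List (Option Int)) (h1 : l.length ≤ r * (j + 1))
    (h2 : r * (j + 1) < l.length + (j + 1)) :
    (PySem.List.pyRange 0 (r : Int) 1).map
      (fun i => PySem.List.slice l (some (i * ((j + 1 : Nat) : Int)))
        (some ((i + 1) * ((j + 1 : Nat) : Int)))) =
      fullC j l ++ (if restC j l = [] then [] else [restC j l]) := by
  rw [PySem.List.pyRange_one, List.map_map]
  have hr : ((r : Int) - 0).toNat = r := by omega
  rw [hr]
  trans (List.range r).map (fun k => (l.drop (k * (j + 1))).take (j + 1))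
  · apply List.map_congr_left
    intro k _
    simp only [Function.comp_apply, zero_add]
    exact slice_row j k l
  · exact map_chunks j r l h1 h2

/-- The core equivalence, with num_cols written as a positive Nat. -/
lemma main_j (j : Nat) (items : List (Option Int)) (fill_last_row : Bool) :
    grid_layout items ((j + 1 : Nat) : Int) fill_last_row =
      grid_layout_alt items ((j + 1 : Nat) : Int) fill_last_row := by
  have hdm := Nat.div_add_mod items.length (j + 1)
  have hmlt : items.length % (j + 1) < j + 1 := Nat.mod_lt _ (by omega)
  have e : (items.length / (j + 1) + 1) * (j + 1) = (j + 1) * (items.length / (j + 1)) + (j + 1) := by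
    ring
  have hre : (restC j items = []) ↔ (items.length % (j + 1) = 0) := by
    rw [← List.length_eq_zero_iff, restC_length]
  simp only [grid_layout, grid_layout_alt]
  rw [foldl_altStep j items [] [] (by simp)]
  simp only [List.nil_append]
  rw [PySem.Int.mod_natCast items.length (j + 1)]
  by_cases hc : fill_last_row = true ∧ ((items.length % (j + 1) : Nat) : Int) ≠ 0
  · -- padded case: fill_last_row and a non-empty short last row
    have hs0 : items.length % (j + 1) ≠ 0 := by
      intro h0; exact hc.2 (by exact_mod_cast h0)
    rw [if_pos hc]
    have hp' : (((j + 1 : Nat) : Int) - ((items.length % (j + 1) : Nat) : Int)).toNat =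
        (j + 1) - items.length % (j + 1) := by omega
    rw [hp']
    have b1 : items.length ≤ (items.length / (j + 1) + 1) * (j + 1) := by omega
    have b2 : (items.length / (j + 1) + 1) * (j + 1) < items.length + (j + 1) := by omega
    rw [ceil_eq j (items.length / (j + 1) + 1) items.length b1 b2]
    have hlen2 : (items ++ List.replicate ((j + 1) - items.length % (j + 1)) (none : Option Int)).length =
        (items.length / (j + 1) + 1) * (j + 1) := by simp; omega
    rw [A_side j (items.length / (j + 1) + 1) _ (by omega) (by omega)]
    have hrpad : restC j (items ++ List.replicate ((j + 1) - items.length % (j + 1)) none) = [] := by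
      rw [← List.length_eq_zero_iff, restC_length, hlen2, Nat.mul_mod_left]
    rw [if_pos hrpad, List.append_nil]
    have hne : restC j items ≠ [] := fun h => hs0 (hre.mp h)
    rw [fullC_pad j ((j + 1) - items.length % (j + 1)) items hne
      (by rw [restC_length]; omega)]
    rw [if_neg hne, if_pos hc.1]
    rw [restC_length]
    have hq : (((j + 1 : Nat) : Int) - ((items.length % (j + 1) : Nat) : Int)).toNat =
        (j + 1) - items.length % (j + 1) := by omega
    rw [hq]
  · -- unpadded case
    rw [if_neg hc]
    by_cases hs0 : items.length % (j + 1) = 0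
    · -- length divides evenly: no partial row
      have b1 : items.length ≤ (items.length / (j + 1)) * (j + 1) := by
        have e2 : (items.length / (j + 1)) * (j + 1) = (j + 1) * (items.length / (j + 1)) := by ring
        omega
      have b2 : (items.length / (j + 1)) * (j + 1) < items.length + (j + 1) := by
        have e2 : (items.length / (j + 1)) * (j + 1) = (j + 1) * (items.length / (j + 1)) := by ring
        omega
      rw [ceil_eq j (items.length / (j + 1)) items.length b1 b2,
        A_side j (items.length / (j + 1)) items b1 b2]
      have hrnil : restC j items = [] := hre.mpr hs0
      rw [if_pos hrnil, if_pos hrnil, List.append_nil]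
    · -- short last row, not padded (fill_last_row must be false here)
      have b1 : items.length ≤ (items.length / (j + 1) + 1) * (j + 1) := by omega
      have b2 : (items.length / (j + 1) + 1) * (j + 1) < items.length + (j + 1) := by omega
      rw [ceil_eq j (items.length / (j + 1) + 1) items.length b1 b2,
        A_side j (items.length / (j + 1) + 1) items b1 b2]
      have hne : restC j items ≠ [] := fun h => hs0 (hre.mp h)
      rw [if_neg hne, if_neg hne]
      have hf : fill_last_row = false := by
        rcases Bool.eq_false_or_eq_true fill_last_row with h | h
        · exact absurd ⟨h, by exact_mod_cast hs0⟩ hc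
        · exact h
      rw [hf]
      simp

theorem grid_layout_spec : Claim_equal_grid_layout := by
  intro items num_cols fill_last_row _ hpre
  unfold Spec_grid_layout
  unfold Pre_grid_layout at hpre
  have hk : num_cols = ((num_cols.toNat - 1 + 1 : Nat) : Int) := by omega
  rw [hk]
  exact main_j _ items fill_last_row
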